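-- pv_equiv track=rewrite | github.com/RideGreg/LintCode | Python/1644-plane-maximum-rectangle.py | getMaximum_sortByColumn
-- ===== SOURCE A (Python) =====
-- def getMaximum_sortByColumn(a):
--     import collections
--     columns = collections.defaultdict(list)
--     firstx, ans = {}, 0
--
--     points = list(set(map(tuple, a)))  # remove duplicates
--     for x, y in points:
--         columns[x].append(y)
--
--     for x in sorted(columns): # sorted(dict) is a sorted list of keys. no values
--         ys = columns[x]
--         ys.sort()
--         for j in range(1, len(ys)):
--             for i in range(j):
--                 y1, y2 = ys[i], ys[j]
--                 if (y1, y2) not in firstx: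
--                     firstx[y1, y2] = x
--                 else:
--                     ans = max(ans, (x - firstx[y1, y2]) * (y2-y1))
--     return ans
-- ===== SOURCE B (Python) =====
-- def getMaximum_sortByColumn(a):
--     # two-phase: build a full (y1,y2) -> [columns] index, then reduce with max/min
--     cols = {}
--     for x, y in a:
--         cols.setdefault(x, set()).add(y)
--     index = {}
--     for x, ys in cols.items():
--         sy = sorted(ys)
--         for i in range(len(sy)):
--             for j in range(i + 1, len(sy)):
--                 index.setdefault((sy[i], sy[j]), []).append(x)
--     ans = 0
--     for (y1, y2), xs in index.items():
--         if len(xs) >= 2: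
--             ans = max(ans, (y2 - y1) * (max(xs) - min(xs)))
--     return ans
-- ===== Notes on version B (the rewrite author's own statement) =====
-- stated objective: alternative
-- what changed: A makes one incremental sweep over columns in sorted order, remembering only the first column of each y-pair in a dict and folding the running maximum as it goes; B is a two-phase computation that first builds a complete (y1,y2) -> list-of-columns index (columns taken in insertion order, unsorted) and then, in a separate reduce pass, takes max over pairs with at least two columns of (y2-y1)*(max(xs)-min(xs)).
import Mathlib
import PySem

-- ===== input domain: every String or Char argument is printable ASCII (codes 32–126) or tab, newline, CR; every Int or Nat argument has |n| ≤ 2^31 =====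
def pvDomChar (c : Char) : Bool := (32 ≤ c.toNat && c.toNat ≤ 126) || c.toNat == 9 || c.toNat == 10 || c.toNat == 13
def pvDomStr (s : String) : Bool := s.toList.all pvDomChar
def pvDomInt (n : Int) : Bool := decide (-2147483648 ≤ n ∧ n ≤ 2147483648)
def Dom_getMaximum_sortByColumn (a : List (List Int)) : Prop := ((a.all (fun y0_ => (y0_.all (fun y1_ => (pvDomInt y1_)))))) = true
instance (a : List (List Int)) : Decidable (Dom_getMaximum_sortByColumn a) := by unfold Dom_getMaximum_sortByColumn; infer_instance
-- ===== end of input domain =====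

-- B replaces A's single sorted-column sweep (firstx dict + running max) by a two-phase
-- build-index-then-reduce computation; equal return value is proved on all length-2-row inputs.

-- ===== PORT A =====
-- A iterates over list(set(...)); the final answer does not depend on that iteration
-- order (keys and each column get sorted), so the first-occurrence order of
-- PySem.Set.ofList is a faithful port of the whole computation.
def getMaximum_sortByColumn (a : List (List Int)) : Int :=
  let points : List (List Int) := PySem.Set.ofList a
  let columns : PySem.Dict Int (List Int) :=
    points.foldl (fun d r =>
      match r with
      | [x, y] => d.modify x [] (fun l => l ++ [y])
      | _ => d) PySem.Dict.empty
  let st :=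
    (PySem.List.sorted columns.keys (fun k => k)).foldl (fun st x =>
      let ys := PySem.List.sorted (columns.getD x []) (fun k => k)
      (PySem.List.pyRange 1 (ys.length : Int) 1).foldl (fun st j =>
        (PySem.List.pyRange 0 j 1).foldl (fun st i =>
          let y1 := PySem.List.pyGetD ys i 0
          let y2 := PySem.List.pyGetD ys j 0
          if st.1.contains (y1, y2) = false then
            (st.1.insert (y1, y2) x, st.2)
          else
            (st.1, max st.2 ((x - st.1.getD (y1, y2) 0) * (y2 - y1)))) st) st)
      ((PySem.Dict.empty : PySem.Dict (Int × Int) Int), (0 : Int))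
  st.2

-- ===== PORT B =====
-- cols.setdefault(x, set()).add(y) is ported as modify with default empty set + add (same dict);
-- the tuple unpack 'for x, y in a' is ported as a length-2 check with head/second access (exact
-- under Pre_, where every row has exactly two entries).
def getMaximum_sortByColumn_alt (a : List (List Int)) : Int :=
  let cols : PySem.Dict Int (PySem.Set Int) :=
    a.foldl (fun d r =>
      if r.length == 2 then
        d.modify (r.headD 0) PySem.Set.empty (fun s => PySem.Set.add s (r.tail.headD 0))
      else d) PySem.Dict.empty
  let index : PySem.Dict (Int × Int) (List Int) :=
    cols.items.foldl (fun d c =>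
      let sy := PySem.List.sorted c.2 (fun k => k)
      (PySem.List.pyRange 0 (sy.length : Int) 1).foldl (fun d i =>
        (PySem.List.pyRange (i + 1) (sy.length : Int) 1).foldl (fun d j =>
          d.modify (PySem.List.pyGetD sy i 0, PySem.List.pyGetD sy j 0) [] (fun l => l ++ [c.1])) d) d)
      PySem.Dict.empty
  index.items.foldl (fun ans it =>
    if 2 ≤ it.2.length then
      max ans ((it.1.2 - it.1.1) *
        (((PySem.List.max? it.2 (fun v => v)).getD 0) - ((PySem.List.min? it.2 (fun v => v)).getD 0)))
    else ans) 0

-- ===== PRECONDITION & SPEC =====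
-- Pre_ excludes exactly the inputs where a row does not have exactly 2 entries:
-- there Python's 'for x, y in points' raises ValueError (too many / not enough values to unpack).
def Pre_getMaximum_sortByColumn (a : List (List Int)) : Prop := ∀ r ∈ a, r.length = 2
instance (a : List (List Int)) : Decidable (Pre_getMaximum_sortByColumn a) := by
  unfold Pre_getMaximum_sortByColumn; infer_instance

def pvWitness_getMaximum_sortByColumn : List (List Int) := [[1, 1], [1, 3], [4, 1], [4, 3], [2, 2]]

def Spec_getMaximum_sortByColumn (a : List (List Int)) (out : Int) : Prop := out = getMaximum_sortByColumn_alt a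
instance (a : List (List Int)) (out : Int) : Decidable (Spec_getMaximum_sortByColumn a out) := by unfold Spec_getMaximum_sortByColumn; infer_instance

-- ===== CLAIM (what is proved, stated in full; the proofs are below) =====
def Claim_equal_getMaximum_sortByColumn : Prop := ∀ (a : List (List Int)), Dom_getMaximum_sortByColumn a → Pre_getMaximum_sortByColumn a → Spec_getMaximum_sortByColumn a (getMaximum_sortByColumn a)

-- ===== LEMMAS AND PROOFS =====

-- a length-2 row as a pair
def pvPair (r : List Int) : Int × Int := (r.headD 0, r.tail.headD 0)

-- the pair list A's inner double loop enumerates over a column's sorted ys (j outer, i inner)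
def pvPairsA (ys : List Int) : List (Int × Int) :=
  (PySem.List.pyRange 1 (ys.length : Int) 1).flatMap (fun j =>
    (PySem.List.pyRange 0 j 1).map (fun i => (PySem.List.pyGetD ys i 0, PySem.List.pyGetD ys j 0)))

-- the pair list B enumerates (i outer, j inner)
def pvPairsB (ys : List Int) : List (Int × Int) :=
  (PySem.List.pyRange 0 (ys.length : Int) 1).flatMap (fun i =>
    (PySem.List.pyRange (i + 1) (ys.length : Int) 1).map (fun j => (PySem.List.pyGetD ys i 0, PySem.List.pyGetD ys j 0)))

-- flattened event lists: (pair, column) in traversal order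
def pvEvents (P : List Int → List (Int × Int)) (L : List (Int × List Int)) : List ((Int × Int) × Int) :=
  L.flatMap (fun c => (P c.2).map (fun p => (p, c.1)))

-- the columns (in order) at which pair p occurs
def pvOcc (E : List ((Int × Int) × Int)) (p : Int × Int) : List Int :=
  (E.filter (fun e => e.1 == p)).map (·.2)

-- A's per-event step on (firstx, ans)
def pvStepA (st : PySem.Dict (Int × Int) Int × Int) (e : (Int × Int) × Int) :
    PySem.Dict (Int × Int) Int × Int :=
  if st.1.contains e.1 = false then (st.1.insert e.1 e.2, st.2)
  else (st.1, max st.2 ((e.2 - st.1.getD e.1 0) * (e.1.2 - e.1.1)))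

-- the list of values A's running max is taken over
def pvContribs (d : PySem.Dict (Int × Int) Int) : List ((Int × Int) × Int) → List Int
  | [] => []
  | e :: E =>
    if d.contains e.1 = false then pvContribs (d.insert e.1 e.2) E
    else ((e.2 - d.getD e.1 0) * (e.1.2 - e.1.1)) :: pvContribs d E

theorem pv_foldA_eq (E : List ((Int × Int) × Int)) (d : PySem.Dict (Int × Int) Int) (ans : Int) :
    (E.foldl pvStepA (d, ans)).2 = (pvContribs d E).foldl max ans := by
  induction E generalizing d ans with
  | nil => simp [pvContribs]
  | cons e E ih =>
    by_cases hc : d.contains e.1 = false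
    · simp [pvStepA, pvContribs, hc, ih]
    · simp [pvStepA, pvContribs, hc, ih]

theorem pv_occ_cons (e : (Int × Int) × Int) (E : List ((Int × Int) × Int)) (p : Int × Int) :
    pvOcc (e :: E) p = if e.1 = p then e.2 :: pvOcc E p else pvOcc E p := by
  simp only [pvOcc, List.filter_cons]
  by_cases h : e.1 = p
  · simp [h]
  · simp [h]

-- membership in pvContribs, phrased via the occurrence lists
theorem pv_mem_contribs (E : List ((Int × Int) × Int)) (d : PySem.Dict (Int × Int) Int) (v : Int) :
    v ∈ pvContribs d E ↔ ∃ p fx,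
      ((d.get? p).or ((pvOcc E p).head?) = some fx) ∧
      ∃ x ∈ (match d.get? p with | some _ => pvOcc E p | none => (pvOcc E p).tail),
        v = (x - fx) * (p.2 - p.1) := by
  induction E generalizing d with
  | nil =>
    simp only [pvContribs, List.not_mem_nil, false_iff]
    rintro ⟨p, fx, hfx, x, hx, -⟩
    cases hd : d.get? p with
    | some w => rw [hd] at hx; simp [pvOcc] at hx
    | none => rw [hd] at hx; simp [pvOcc] at hx
  | cons e E ih =>
    by_cases hc : d.contains e.1 = false
    · have hdn : d.get? e.1 = none := (PySem.Dict.get?_eq_none_iff_contains d e.1).mpr hc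
      rw [pvContribs, if_pos hc, ih]
      apply exists_congr; intro p
      by_cases hp : p = e.1
      · subst hp
        simp [PySem.Dict.get?_insert_self, hdn, pv_occ_cons]
      · have h1 : (d.insert e.1 e.2).get? p = d.get? p := PySem.Dict.get?_insert_of_ne d e.2 hp
        have h2 : pvOcc (e :: E) p = pvOcc E p := by
          rw [pv_occ_cons, if_neg (fun h => hp h.symm)]
        rw [h1, h2]
    · have hsome : ∃ w, d.get? e.1 = some w := by
        rw [Bool.not_eq_false] at hc
        rw [PySem.Dict.contains_eq_isSome_get?] at hc
        exact Option.isSome_iff_exists.mp hc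
      obtain ⟨fx0, hd0⟩ := hsome
      have hgd : d.getD e.1 0 = fx0 := PySem.Dict.getD_of_get?_eq_some d 0 hd0
      rw [pvContribs, if_neg hc, hgd, List.mem_cons, ih]
      constructor
      · rintro (hv | ⟨p, fx, hfx, x, hx, hv⟩)
        · refine ⟨e.1, fx0, by simp [hd0], e.2, ?_, hv⟩
          rw [hd0]
          simp [pv_occ_cons]
        · by_cases hp : p = e.1
          · subst hp
            refine ⟨e.1, fx, ?_, x, ?_, hv⟩
            · rw [hd0] at hfx ⊢; exact hfx
            · rw [hd0] at hx ⊢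
              rw [pv_occ_cons, if_pos rfl]
              exact List.mem_cons_of_mem _ hx
          · have h2 : pvOcc (e :: E) p = pvOcc E p := by
              rw [pv_occ_cons, if_neg (fun h => hp h.symm)]
            exact ⟨p, fx, by rw [h2]; exact hfx, x, by rw [h2]; exact hx, hv⟩
      · rintro ⟨p, fx, hfx, x, hx, hv⟩
        by_cases hp : p = e.1
        · subst hp
          rw [hd0] at hfx hx
          simp only [Option.some_or] at hfx
          obtain rfl : fx0 = fx := by injection hfx
          rw [pv_occ_cons, if_pos rfl, List.mem_cons] at hx
          rcases hx with rfl | hx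
          · exact Or.inl hv
          · exact Or.inr ⟨e.1, fx0, by simp [hd0], x, by rw [hd0]; exact hx, hv⟩
        · have h2 : pvOcc (e :: E) p = pvOcc E p := by
            rw [pv_occ_cons, if_neg (fun h => hp h.symm)]
          rw [h2] at hfx hx
          exact Or.inr ⟨p, fx, hfx, x, hx, hv⟩

-- strictly sorted list: order of entries reflects order of indices
theorem pv_getElem_lt_iff (ys : List Int) (h : ys.Pairwise (· < ·)) {i j : Nat}
    (hi : i < ys.length) (hj : j < ys.length) : ys[i] < ys[j] ↔ i < j := by
  rw [List.pairwise_iff_getElem] at h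
  constructor
  · intro hlt
    by_contra hij
    rcases Nat.lt_or_ge j i with hji | hji
    · exact absurd (h j i hj hi hji) (not_lt_of_gt hlt)
    · have : i = j := by omega
      subst this; exact lt_irrefl _ hlt
  · intro hij; exact h i j hi hj hij

-- strictly sorted list: pair-list membership characterisation
theorem pv_mem_pairsA (ys : List Int) (h : ys.Pairwise (· < ·)) (p : Int × Int) :
    p ∈ pvPairsA ys ↔ p.1 ∈ ys ∧ p.2 ∈ ys ∧ p.1 < p.2 := by
  simp only [pvPairsA, List.mem_flatMap, List.mem_map, PySem.List.mem_pyRange_one]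
  constructor
  · rintro ⟨j, ⟨hj1, hj2⟩, i, ⟨hi1, hi2⟩, hp⟩
    have hjl : j < (ys.length : Int) := hj2
    have hil : i < (ys.length : Int) := lt_trans hi2 hj2
    rw [PySem.List.pyGetD_eq_getElem ys 0 hi1 hil,
        PySem.List.pyGetD_eq_getElem ys 0 (le_trans zero_le_one hj1) hjl] at hp
    subst hp
    refine ⟨List.getElem_mem _, List.getElem_mem _, ?_⟩
    rw [pv_getElem_lt_iff ys h]
    omega
  · rintro ⟨h1, h2, hlt⟩
    obtain ⟨i, hi, hyi⟩ := List.mem_iff_getElem.mp h1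
    obtain ⟨j, hj, hyj⟩ := List.mem_iff_getElem.mp h2
    have hij : i < j := by
      rw [← pv_getElem_lt_iff ys h hi hj, hyi, hyj]; exact hlt
    refine ⟨(j : Int), ⟨by omega, by exact_mod_cast hj⟩, (i : Int), ⟨by omega, by exact_mod_cast hij⟩, ?_⟩
    have e1 : PySem.List.pyGetD ys (i : Int) 0 = ys[i] := by
      rw [PySem.List.pyGetD_eq_getElem ys 0 (by omega) (by exact_mod_cast hi)]; simp
    have e2 : PySem.List.pyGetD ys (j : Int) 0 = ys[j] := by
      rw [PySem.List.pyGetD_eq_getElem ys 0 (by omega) (by exact_mod_cast hj)]; simp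
    rw [e1, e2, hyi, hyj]

theorem pv_mem_pairsB (ys : List Int) (h : ys.Pairwise (· < ·)) (p : Int × Int) :
    p ∈ pvPairsB ys ↔ p.1 ∈ ys ∧ p.2 ∈ ys ∧ p.1 < p.2 := by
  simp only [pvPairsB, List.mem_flatMap, List.mem_map, PySem.List.mem_pyRange_one]
  constructor
  · rintro ⟨i, ⟨hi1, hi2⟩, j, ⟨hj1, hj2⟩, hp⟩
    rw [PySem.List.pyGetD_eq_getElem ys 0 hi1 (lt_trans (by omega) hj2),
        PySem.List.pyGetD_eq_getElem ys 0 (by omega) hj2] at hp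
    subst hp
    refine ⟨List.getElem_mem _, List.getElem_mem _, ?_⟩
    rw [pv_getElem_lt_iff ys h]
    omega
  · rintro ⟨h1, h2, hlt⟩
    obtain ⟨i, hi, hyi⟩ := List.mem_iff_getElem.mp h1
    obtain ⟨j, hj, hyj⟩ := List.mem_iff_getElem.mp h2
    have hij : i < j := by
      rw [← pv_getElem_lt_iff ys h hi hj, hyi, hyj]; exact hlt
    refine ⟨(i : Int), ⟨by omega, by exact_mod_cast lt_trans hij hj⟩, (j : Int), ⟨by exact_mod_cast hij, by exact_mod_cast hj⟩, ?_⟩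
    have e1 : PySem.List.pyGetD ys (i : Int) 0 = ys[i] := by
      rw [PySem.List.pyGetD_eq_getElem ys 0 (by omega) (by exact_mod_cast hi)]; simp
    have e2 : PySem.List.pyGetD ys (j : Int) 0 = ys[j] := by
      rw [PySem.List.pyGetD_eq_getElem ys 0 (by omega) (by exact_mod_cast hj)]; simp
    rw [e1, e2, hyi, hyj]

theorem pv_nodup_pairsA (ys : List Int) (h : ys.Pairwise (· < ·)) : (pvPairsA ys).Nodup := by
  rw [pvPairsA, List.nodup_flatMap]
  constructor
  · intro j hj
    rw [PySem.List.mem_pyRange_one] at hj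
    refine List.Nodup.map_on ?_ (PySem.List.nodup_pyRange_one _ _)
    intro i hi i' hi' hval
    rw [PySem.List.mem_pyRange_one] at hi hi'
    have e1 := PySem.List.pyGetD_eq_getElem ys (i := i) 0 (by omega) (by omega)
    have e2 := PySem.List.pyGetD_eq_getElem ys (i := i') 0 (by omega) (by omega)
    have : ys[i.toNat] = ys[i'.toNat] := by
      have := congrArg Prod.fst hval
      simpa [e1, e2] using this
    have hne : i.toNat = i'.toNat := by
      by_contra hne
      rcases Nat.lt_or_ge i.toNat i'.toNat with hl | hl
      · exact absurd ((pv_getElem_lt_iff ys h (by omega) (by omega)).mpr hl) (by rw [this]; exact lt_irrefl _)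
      · have hl' : i'.toNat < i.toNat := by omega
        exact absurd ((pv_getElem_lt_iff ys h (by omega) (by omega)).mpr hl') (by rw [this]; exact lt_irrefl _)
    omega
  · refine List.Pairwise.imp_of_mem ?_ (PySem.List.pairwise_lt_pyRange_one _ _)
    intro j j' hj hj' hlt
    rw [PySem.List.mem_pyRange_one] at hj hj'
    intro q hq hq'
    rw [List.mem_map] at hq hq'
    obtain ⟨i, hi, rfl⟩ := hq
    obtain ⟨i', hi', hq'⟩ := hq'
    rw [PySem.List.mem_pyRange_one] at hi hi'
    have e2 := PySem.List.pyGetD_eq_getElem ys (i := j) 0 (by omega) (by omega)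
    have e2' := PySem.List.pyGetD_eq_getElem ys (i := j') 0 (by omega) (by omega)
    have : ys[j'.toNat] = ys[j.toNat] := by
      have := congrArg Prod.snd hq'
      simpa [e2, e2'] using this
    have : j'.toNat < j.toNat ∨ j.toNat < j'.toNat := by omega
    rcases this with hl | hl
    · exact absurd ((pv_getElem_lt_iff ys h (by omega) (by omega)).mpr hl) (by rw [‹ys[j'.toNat] = ys[j.toNat]›]; exact lt_irrefl _)
    · exact absurd ((pv_getElem_lt_iff ys h (by omega) (by omega)).mpr hl) (by rw [‹ys[j'.toNat] = ys[j.toNat]›]; exact lt_irrefl _)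

theorem pv_nodup_pairsB (ys : List Int) (h : ys.Pairwise (· < ·)) : (pvPairsB ys).Nodup := by
  rw [pvPairsB, List.nodup_flatMap]
  constructor
  · intro i hi
    rw [PySem.List.mem_pyRange_one] at hi
    refine List.Nodup.map_on ?_ (PySem.List.nodup_pyRange_one _ _)
    intro j hj j' hj' hval
    rw [PySem.List.mem_pyRange_one] at hj hj'
    have e1 := PySem.List.pyGetD_eq_getElem ys (i := j) 0 (by omega) (by omega)
    have e2 := PySem.List.pyGetD_eq_getElem ys (i := j') 0 (by omega) (by omega)
    have : ys[j.toNat] = ys[j'.toNat] := by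
      have := congrArg Prod.snd hval
      simpa [e1, e2] using this
    have : j.toNat = j'.toNat := by
      by_contra hne
      rcases Nat.lt_or_ge j.toNat j'.toNat with hl | hl
      · exact absurd ((pv_getElem_lt_iff ys h (by omega) (by omega)).mpr hl) (by rw [this]; exact lt_irrefl _)
      · have hl' : j'.toNat < j.toNat := by omega
        exact absurd ((pv_getElem_lt_iff ys h (by omega) (by omega)).mpr hl') (by rw [this]; exact lt_irrefl _)
    omega
  · refine List.Pairwise.imp_of_mem ?_ (PySem.List.pairwise_lt_pyRange_one _ _)
    intro i i' hi hi' hlt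
    rw [PySem.List.mem_pyRange_one] at hi hi'
    intro q hq hq'
    rw [List.mem_map] at hq hq'
    obtain ⟨j, hj, rfl⟩ := hq
    obtain ⟨j', hj', hq'⟩ := hq'
    rw [PySem.List.mem_pyRange_one] at hj hj'
    have e2 := PySem.List.pyGetD_eq_getElem ys (i := i) 0 (by omega) (by omega)
    have e2' := PySem.List.pyGetD_eq_getElem ys (i := i') 0 (by omega) (by omega)
    have : ys[i'.toNat] = ys[i.toNat] := by
      have := congrArg Prod.fst hq'
      simpa [e2, e2'] using this
    have : i'.toNat < i.toNat ∨ i.toNat < i'.toNat := by omega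
    rcases this with hl | hl
    · exact absurd ((pv_getElem_lt_iff ys h (by omega) (by omega)).mpr hl) (by rw [‹ys[i'.toNat] = ys[i.toNat]›]; exact lt_irrefl _)
    · exact absurd ((pv_getElem_lt_iff ys h (by omega) (by omega)).mpr hl) (by rw [‹ys[i'.toNat] = ys[i.toNat]›]; exact lt_irrefl _)

-- occurrences through the flattening: one entry per column containing p
theorem pv_occ_append (E F : List ((Int × Int) × Int)) (p : Int × Int) :
    pvOcc (E ++ F) p = pvOcc E p ++ pvOcc F p := by
  simp [pvOcc, List.filter_append]

theorem pv_occ_events (P : List Int → List (Int × Int)) (L : List (Int × List Int)) (p : Int × Int)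
    (h : ∀ c ∈ L, (P c.2).count p ≤ 1) :
    pvOcc (pvEvents P L) p = (L.filter (fun c => decide (p ∈ P c.2))).map (·.1) := by
  induction L with
  | nil => simp [pvEvents, pvOcc]
  | cons c L ih =>
    have hc := h c (List.mem_cons_self)
    have hstep : pvOcc ((P c.2).map (fun q => (q, c.1))) p =
        if p ∈ P c.2 then [c.1] else [] := by
      have : ((P c.2).map (fun q => (q, c.1))).filter (fun e => e.1 == p) =
          ((P c.2).filter (fun q => q == p)).map (fun q => (q, c.1)) := by
        rw [List.filter_map]; rfl
      rw [pvOcc, this, List.filter_beq, List.map_map]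
      by_cases hp : p ∈ P c.2
      · have h1 : (P c.2).count p = 1 := le_antisymm hc (List.count_pos_iff.mpr hp)
        simp [h1, hp]
      · have h0 : (P c.2).count p = 0 := List.count_eq_zero.mpr hp
        simp [h0, hp]
    have : pvEvents P (c :: L) = (P c.2).map (fun q => (q, c.1)) ++ pvEvents P L := by
      simp [pvEvents]
    rw [this, pv_occ_append, hstep, ih (fun c hc => h c (List.mem_cons_of_mem _ hc)),
        List.filter_cons]
    by_cases hp : p ∈ P c.2
    · simp [hp]
    · simp [hp]

-- canonical proof-side objects (a fixed input a)
def pvA2 (a : List (List Int)) : List (Int × Int) := (PySem.Set.ofList a).map pvPair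
def pvR2 (a : List (List Int)) : List (Int × Int) := a.map pvPair

def pvColsA (a : List (List Int)) : PySem.Dict Int (List Int) :=
  (pvA2 a).foldl (fun d p => d.modify p.1 [] (fun l => l ++ [p.2])) PySem.Dict.empty

def pvColsB (a : List (List Int)) : PySem.Dict Int (PySem.Set Int) :=
  (pvR2 a).foldl (fun d p => d.modify p.1 PySem.Set.empty (fun s => PySem.Set.add s p.2)) PySem.Dict.empty

-- the canonical sorted, duplicate-free column of x
def pvYs (a : List (List Int)) (x : Int) : List Int :=
  PySem.List.sorted ((pvColsA a).getD x []) (fun k => k)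

-- p forms a rectangle side in column x
def pvHas (a : List (List Int)) (p : Int × Int) (x : Int) : Prop :=
  p.1 ∈ pvYs a x ∧ p.2 ∈ pvYs a x ∧ p.1 < p.2

def pvLA (a : List (List Int)) : List (Int × List Int) :=
  (PySem.List.sorted (pvColsA a).keys (fun k => k)).map (fun x => (x, pvYs a x))

def pvLB (a : List (List Int)) : List (Int × List Int) :=
  (pvColsB a).items.map (fun c => (c.1, PySem.List.sorted c.2 (fun k => k)))

def pvIndexB (a : List (List Int)) : PySem.Dict (Int × Int) (List Int) :=
  (pvEvents pvPairsB (pvLB a)).foldl (fun d e => d.modify e.1 [] (fun l => l ++ [e.2])) PySem.Dict.empty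

def pvEA (a : List (List Int)) : List ((Int × Int) × Int) := pvEvents pvPairsA (pvLA a)
def pvEB (a : List (List Int)) : List ((Int × Int) × Int) := pvEvents pvPairsB (pvLB a)

-- list facts ------------------------------------------------------------
theorem pv_pairwise_lt_of_le_nodup (l : List Int) (h1 : l.Pairwise (· ≤ ·)) (h2 : l.Nodup) :
    l.Pairwise (· < ·) := by
  have := h1.and h2
  exact this.imp (fun h => lt_of_le_of_ne h.1 h.2)

theorem pv_foldl_if_max {α : Type} (L : List α) (c : α → Prop) [DecidablePred c] (g : α → Int) (a0 : Int) :
    L.foldl (fun ans k => if c k then max ans (g k) else ans) a0 =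
      (L.filterMap (fun k => if c k then some (g k) else none)).foldl max a0 := by
  induction L generalizing a0 with
  | nil => rfl
  | cons k L ih =>
    by_cases hk : c k
    · simp [hk, ih]
    · simp [hk, ih]

-- column-content facts ---------------------------------------------------
theorem pv_colA_getD (a : List (List Int)) (x : Int) :
    (pvColsA a).getD x [] = (((pvA2 a).filter (fun q => q.1 == x)).map (·.2)) := by
  rw [pvColsA, PySem.Dict.getD_foldl_modify_append, PySem.Dict.getD_empty, List.nil_append]

theorem pv_colB_getD (a : List (List Int)) (x : Int) :
    (pvColsB a).getD x PySem.Set.empty =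
      PySem.Set.ofList (((pvR2 a).filter (fun q => q.1 == x)).map (·.2)) := by
  have key : ∀ (l : List (Int × Int)) (d : PySem.Dict Int (PySem.Set Int)) (c : Int),
      (l.foldl (fun d p => d.modify p.1 PySem.Set.empty (fun s => PySem.Set.add s p.2)) d).getD c PySem.Set.empty
        = PySem.Set.update (d.getD c PySem.Set.empty) ((l.filter (fun q => q.1 == c)).map (·.2)) := by
    intro l
    induction l with
    | nil => intro d c; rfl
    | cons p l ih =>
      intro d c
      rw [List.foldl_cons, ih, List.filter_cons]
      by_cases hc : p.1 = c
      · subst hc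
        rw [PySem.Dict.getD_modify]
        simp only [beq_self_eq_true, if_pos]
        rfl
      · rw [PySem.Dict.getD_modify]
        have hbeq : (p.1 == c) = false := beq_eq_false_iff_ne.mpr hc
        rw [if_neg (fun h => hc h.symm), hbeq]
        simp
  rw [pvColsB, key, PySem.Dict.getD_empty]
  rfl

theorem pv_mem2 (a : List (List Int)) (q : Int × Int) : q ∈ pvA2 a ↔ q ∈ pvR2 a := by
  simp [pvA2, pvR2, List.mem_map, PySem.Set.mem_ofList]

theorem pv_nodupA2 (a : List (List Int)) (hPre : Pre_getMaximum_sortByColumn a) :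
    (pvA2 a).Nodup := by
  refine List.Nodup.map_on ?_ (PySem.Set.nodup_ofList a)
  intro r hr r' hr' hval
  have h2 : r.length = 2 := hPre r ((PySem.Set.mem_ofList a r).mp hr)
  have h2' : r'.length = 2 := hPre r' ((PySem.Set.mem_ofList a r').mp hr')
  have e : r = [(pvPair r).1, (pvPair r).2] := by
    match r, h2 with
    | [x, y], _ => rfl
  have e' : r' = [(pvPair r').1, (pvPair r').2] := by
    match r', h2' with
    | [x, y], _ => rfl
  rw [e, e', hval]

theorem pv_colA_nodup (a : List (List Int)) (hPre : Pre_getMaximum_sortByColumn a) (x : Int) :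
    ((pvColsA a).getD x []).Nodup := by
  rw [pv_colA_getD]
  refine List.Nodup.map_on ?_ ((pv_nodupA2 a hPre).filter _)
  intro q hq q' hq' hval
  have h1 : q.1 = x := by simpa using (List.mem_filter.mp hq).2
  have h1' : q'.1 = x := by simpa using (List.mem_filter.mp hq').2
  exact Prod.ext (h1.trans h1'.symm) hval

theorem pv_ys_pairwise (a : List (List Int)) (hPre : Pre_getMaximum_sortByColumn a) (x : Int) :
    (pvYs a x).Pairwise (· < ·) := by
  refine pv_pairwise_lt_of_le_nodup _ (PySem.List.sorted_pairwise _ _) ?_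
  exact ((PySem.List.sorted_perm ((pvColsA a).getD x []) (fun k => k) false).nodup_iff).mpr
    (pv_colA_nodup a hPre x)

theorem pv_ys_eq (a : List (List Int)) (hPre : Pre_getMaximum_sortByColumn a) (x : Int) :
    PySem.List.sorted ((pvColsB a).getD x PySem.Set.empty) (fun k => k) = pvYs a x := by
  rw [pvYs]
  refine PySem.List.sorted_eq_sorted_of_perm _ _ _ (fun u v h => h) ?_
  rw [pv_colB_getD, pv_colA_getD]
  rw [List.perm_ext_iff_of_nodup (PySem.Set.nodup_ofList _) ?nd]
  case nd =>
    have := pv_colA_nodup a hPre x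
    rwa [pv_colA_getD] at this
  intro y
  rw [PySem.Set.mem_ofList]
  constructor
  · intro hy
    rw [List.mem_map] at hy ⊢
    obtain ⟨q, hq, rfl⟩ := hy
    have hm := List.mem_filter.mp hq
    refine ⟨q, List.mem_filter.mpr ⟨(pv_mem2 a q).mpr hm.1, hm.2⟩, rfl⟩
  · intro hy
    rw [List.mem_map] at hy ⊢
    obtain ⟨q, hq, rfl⟩ := hy
    have hm := List.mem_filter.mp hq
    refine ⟨q, List.mem_filter.mpr ⟨(pv_mem2 a q).mp hm.1, hm.2⟩, rfl⟩

theorem pv_keysA_nodup (a : List (List Int)) : (pvColsA a).keys.Nodup :=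
  PySem.Dict.nodup_keys_foldl_modify_key _ Prod.fst _ (fun _ p => fun l => l ++ [p.2]) _
    PySem.Dict.nodup_keys_empty

theorem pv_keysB_nodup (a : List (List Int)) : (pvColsB a).keys.Nodup :=
  PySem.Dict.nodup_keys_foldl_modify_key _ Prod.fst _ (fun _ p => fun s => PySem.Set.add s p.2) _
    PySem.Dict.nodup_keys_empty

theorem pv_mem_keys (a : List (List Int)) (x : Int) :
    x ∈ (pvColsB a).keys ↔ x ∈ (pvColsA a).keys := by
  rw [pvColsA, pvColsB, PySem.Dict.keys_foldl_modify_key, PySem.Dict.keys_foldl_modify_key,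
    PySem.Dict.keys_empty]
  show x ∈ PySem.Set.ofList _ ↔ x ∈ PySem.Set.ofList _
  rw [PySem.Set.mem_ofList, PySem.Set.mem_ofList, List.mem_map, List.mem_map]
  constructor
  · rintro ⟨q, hq, rfl⟩; exact ⟨q, (pv_mem2 a q).mpr hq, rfl⟩
  · rintro ⟨q, hq, rfl⟩; exact ⟨q, (pv_mem2 a q).mp hq, rfl⟩

-- key of a nonempty column
theorem pv_key_of_ys (a : List (List Int)) (x : Int) (h : pvYs a x ≠ []) :
    x ∈ (pvColsA a).keys := by
  rw [pvYs, Ne, PySem.List.sorted_eq_nil_iff, pv_colA_getD] at h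
  have : ∃ q ∈ pvA2 a, q.1 = x := by
    rcases List.exists_mem_of_ne_nil _ h with ⟨y, hy⟩
    rw [List.mem_map] at hy
    obtain ⟨q, hq, -⟩ := hy
    have hm := List.mem_filter.mp hq
    exact ⟨q, hm.1, by simpa using hm.2⟩
  obtain ⟨q, hq, rfl⟩ := this
  rw [pvColsA, PySem.Dict.keys_foldl_modify_key, PySem.Dict.keys_empty]
  show q.1 ∈ PySem.Set.ofList _
  rw [PySem.Set.mem_ofList]
  exact List.mem_map.mpr ⟨q, hq, rfl⟩

-- occurrence-list facts --------------------------------------------------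
theorem pv_LB_eq (a : List (List Int)) (hPre : Pre_getMaximum_sortByColumn a) :
    pvLB a = (pvColsB a).keys.map (fun x => (x, pvYs a x)) := by
  rw [pvLB, PySem.Dict.items_eq_map_keys _ (pv_keysB_nodup a) PySem.Set.empty, List.map_map]
  refine List.map_congr_left ?_
  intro x hx
  show (x, PySem.List.sorted ((pvColsB a).getD x PySem.Set.empty) (fun k => k)) = _
  rw [pv_ys_eq a hPre x]

theorem pv_occA_char (a : List (List Int)) (hPre : Pre_getMaximum_sortByColumn a) (p : Int × Int) :
    pvOcc (pvEA a) p = ((pvLA a).filter (fun c => decide (p ∈ pvPairsA c.2))).map (·.1) := by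
  refine pv_occ_events pvPairsA (pvLA a) p ?_
  intro c hc
  rw [pvLA, List.mem_map] at hc
  obtain ⟨x, -, rfl⟩ := hc
  exact List.nodup_iff_count_le_one.mp (pv_nodup_pairsA _ (pv_ys_pairwise a hPre x)) p

theorem pv_occB_char (a : List (List Int)) (hPre : Pre_getMaximum_sortByColumn a) (p : Int × Int) :
    pvOcc (pvEB a) p = ((pvLB a).filter (fun c => decide (p ∈ pvPairsB c.2))).map (·.1) := by
  refine pv_occ_events pvPairsB (pvLB a) p ?_
  intro c hc
  rw [pv_LB_eq a hPre, List.mem_map] at hc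
  obtain ⟨x, -, rfl⟩ := hc
  exact List.nodup_iff_count_le_one.mp (pv_nodup_pairsB _ (pv_ys_pairwise a hPre x)) p

theorem pv_mem_occA (a : List (List Int)) (hPre : Pre_getMaximum_sortByColumn a) (p : Int × Int) (x : Int) :
    x ∈ pvOcc (pvEA a) p ↔ pvHas a p x := by
  rw [pv_occA_char a hPre p]
  simp only [List.mem_map, List.mem_filter, pvLA, decide_eq_true_eq]
  constructor
  · rintro ⟨c, ⟨⟨x', hx', rfl⟩, hp⟩, rfl⟩
    exact (pv_mem_pairsA _ (pv_ys_pairwise a hPre x') p).mp hp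
  · intro hp
    have hkey : x ∈ (pvColsA a).keys := by
      refine pv_key_of_ys a x (fun hnil => ?_)
      have h1 := hp.1
      rw [hnil] at h1
      simp at h1
    refine ⟨(x, pvYs a x), ⟨⟨x, ?_, rfl⟩, ?_⟩, rfl⟩
    · rw [PySem.List.mem_sorted]; exact hkey
    · exact (pv_mem_pairsA _ (pv_ys_pairwise a hPre x) p).mpr hp

theorem pv_mem_occB (a : List (List Int)) (hPre : Pre_getMaximum_sortByColumn a) (p : Int × Int) (x : Int) :
    x ∈ pvOcc (pvEB a) p ↔ pvHas a p x := by
  rw [pv_occB_char a hPre p]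
  simp only [List.mem_map, List.mem_filter, pv_LB_eq a hPre, decide_eq_true_eq]
  constructor
  · rintro ⟨c, ⟨⟨x', hx', rfl⟩, hp⟩, rfl⟩
    exact (pv_mem_pairsB _ (pv_ys_pairwise a hPre x') p).mp hp
  · intro hp
    have hkey : x ∈ (pvColsB a).keys := by
      refine (pv_mem_keys a x).mpr (pv_key_of_ys a x (fun hnil => ?_))
      have h1 := hp.1
      rw [hnil] at h1
      simp at h1
    refine ⟨(x, pvYs a x), ⟨⟨x, hkey, rfl⟩, ?_⟩, rfl⟩
    exact (pv_mem_pairsB _ (pv_ys_pairwise a hPre x) p).mpr hp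

theorem pv_occA_pairwise (a : List (List Int)) (hPre : Pre_getMaximum_sortByColumn a) (p : Int × Int) :
    (pvOcc (pvEA a) p).Pairwise (· < ·) := by
  rw [pv_occA_char a hPre p]
  have hsub : (((pvLA a).filter (fun c => decide (p ∈ pvPairsA c.2))).map (·.1)).Sublist
      ((pvLA a).map (·.1)) := List.Sublist.map _ List.filter_sublist
  refine List.Pairwise.sublist hsub ?_
  rw [pvLA, List.map_map]
  have hfun : ((fun (c : Int × List Int) => c.1) ∘ fun x => (x, pvYs a x)) = fun x : Int => x := by
    funext x; rfl
  rw [hfun, List.map_id']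
  refine pv_pairwise_lt_of_le_nodup _ (PySem.List.sorted_pairwise _ _) ?_
  exact ((PySem.List.sorted_perm (pvColsA a).keys (fun k => k) false).nodup_iff).mpr (pv_keysA_nodup a)

theorem pv_occB_nodup (a : List (List Int)) (hPre : Pre_getMaximum_sortByColumn a) (p : Int × Int) :
    (pvOcc (pvEB a) p).Nodup := by
  rw [pv_occB_char a hPre p]
  have hsub : (((pvLB a).filter (fun c => decide (p ∈ pvPairsB c.2))).map (·.1)).Sublist
      ((pvLB a).map (·.1)) := List.Sublist.map _ List.filter_sublist
  refine List.Nodup.sublist hsub ?_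
  rw [pv_LB_eq a hPre, List.map_map]
  have hfun : ((fun (c : Int × List Int) => c.1) ∘ fun x => (x, pvYs a x)) = fun x : Int => x := by
    funext x; rfl
  rw [hfun, List.map_id']
  exact pv_keysB_nodup a

-- A's port, flattened to a single event fold
theorem pv_A_eq (a : List (List Int)) (hPre : Pre_getMaximum_sortByColumn a) :
    getMaximum_sortByColumn a = ((pvEA a).foldl pvStepA (PySem.Dict.empty, 0)).2 := by
  unfold getMaximum_sortByColumn
  have hrow : ∀ r ∈ (PySem.Set.ofList a : List (List Int)), r = [(pvPair r).1, (pvPair r).2] := by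
    intro r hr
    have h2 : r.length = 2 := hPre r ((PySem.Set.mem_ofList a r).mp hr)
    match r, h2 with
    | [x, y], _ => rfl
  have hcols : (PySem.Set.ofList a : List (List Int)).foldl (fun d r =>
      match r with
      | [x, y] => d.modify x [] (fun l => l ++ [y])
      | _ => d) PySem.Dict.empty = pvColsA a := by
    rw [pvColsA, pvA2, List.foldl_map]
    apply PySem.List.foldl_congr_mem
    intro d r hr
    conv_lhs => rw [hrow r hr]
  simp only [hcols]
  simp only [pvEA, pvEvents, pvLA, pvPairsA, pvStepA, List.map_flatMap, List.map_map,
    List.foldl_flatMap, List.foldl_map]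
  rfl

-- B's port, as a reduce over pvIndexB
theorem pv_B_eq (a : List (List Int)) (hPre : Pre_getMaximum_sortByColumn a) :
    getMaximum_sortByColumn_alt a = (pvIndexB a).items.foldl (fun ans it =>
      if 2 ≤ it.2.length then
        max ans ((it.1.2 - it.1.1) *
          (((PySem.List.max? it.2 (fun v => v)).getD 0) - ((PySem.List.min? it.2 (fun v => v)).getD 0)))
      else ans) 0 := by
  unfold getMaximum_sortByColumn_alt
  have hcols : a.foldl (fun d r =>
      if r.length == 2 then
        d.modify (r.headD 0) PySem.Set.empty (fun s => PySem.Set.add s (r.tail.headD 0))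
      else d) PySem.Dict.empty = pvColsB a := by
    rw [pvColsB, pvR2, List.foldl_map]
    apply PySem.List.foldl_congr_mem
    intro d r hr
    have h2 : (r.length == 2) = true := by simp [hPre r hr]
    rw [h2]
    rfl
  simp only [hcols]
  simp only [pvIndexB, pvEvents, pvLB, pvPairsB, List.map_flatMap, List.map_map,
    List.foldl_flatMap, List.foldl_map]
  rfl

theorem getMaximum_sortByColumn_spec : Claim_equal_getMaximum_sortByColumn := by
  intro a hDom hPre
  unfold Spec_getMaximum_sortByColumn
  rw [pv_A_eq a hPre, pv_B_eq a hPre, pv_foldA_eq]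
  -- B side: reduce over the index's items, rewritten through keys and occurrence lists
  have hidx_nodup : (pvIndexB a).keys.Nodup := by
    rw [pvIndexB]
    exact PySem.Dict.nodup_keys_foldl_modify_key _ Prod.fst _ (fun _ e => fun l => l ++ [e.2]) _
      PySem.Dict.nodup_keys_empty
  have hidx_getD : ∀ p, (pvIndexB a).getD p [] = pvOcc (pvEB a) p := by
    intro p
    rw [pvIndexB, PySem.Dict.getD_foldl_modify_append, PySem.Dict.getD_empty, List.nil_append]
    rfl
  have hidx_items : (pvIndexB a).items = (pvIndexB a).keys.map (fun p => (p, pvOcc (pvEB a) p)) := by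
    rw [PySem.Dict.items_eq_map_keys _ hidx_nodup []]
    exact List.map_congr_left (fun p _ => by rw [hidx_getD p])
  rw [hidx_items, List.foldl_map, pv_foldl_if_max]
  -- abbreviations
  set oA := fun p => pvOcc (pvEA a) p with hoAdef
  set oB := fun p => pvOcc (pvEB a) p with hoBdef
  set CA := pvContribs PySem.Dict.empty (pvEA a) with hCAdef
  set VB := (pvIndexB a).keys.filterMap (fun p =>
    if 2 ≤ (p, oB p).2.length then
      some (((p, oB p).1.2 - (p, oB p).1.1) *
        ((PySem.List.max? (p, oB p).2 fun v => v).getD 0 - (PySem.List.min? (p, oB p).2 fun v => v).getD 0))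
    else none) with hVBdef
  have hmemCA : ∀ v, v ∈ CA ↔ ∃ p fx, (oA p).head? = some fx ∧
      ∃ x ∈ (oA p).tail, v = (x - fx) * (p.2 - p.1) := by
    intro v
    rw [hCAdef, pv_mem_contribs]
    simp only [PySem.Dict.get?_empty, Option.none_or, hoAdef]
  have hkeys : ∀ p, p ∈ (pvIndexB a).keys ↔ ∃ x, x ∈ oB p := by
    intro p
    rw [pvIndexB, PySem.Dict.keys_foldl_modify_key, PySem.Dict.keys_empty]
    show p ∈ PySem.Set.ofList _ ↔ _
    rw [PySem.Set.mem_ofList, List.mem_map]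
    constructor
    · rintro ⟨e, he, rfl⟩
      exact ⟨e.2, List.mem_map.mpr ⟨e, List.mem_filter.mpr ⟨he, by simp⟩, rfl⟩⟩
    · rintro ⟨x, hx⟩
      rw [hoBdef] at hx
      simp only [pvOcc, List.mem_map, List.mem_filter] at hx
      obtain ⟨e, ⟨he, heq⟩, rfl⟩ := hx
      exact ⟨e, he, by simpa using heq⟩
  have hperm : ∀ p, (oA p).Perm (oB p) := fun p =>
    (List.perm_ext_iff_of_nodup ((pv_occA_pairwise a hPre p).imp (fun h => ne_of_lt h))
      (pv_occB_nodup a hPre p)).mpr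
      (fun x => (pv_mem_occA a hPre p x).trans (pv_mem_occB a hPre p x).symm)
  -- the two inequalities
  apply le_antisymm
  · rcases PySem.List.foldl_max_mem CA 0 with h0 | hm
    · rw [h0]; exact (PySem.List.le_foldl_max VB 0).1
    · obtain ⟨p, fx, hhead, x, hxt, hv⟩ := (hmemCA _).mp hm
      obtain ⟨t, hoA⟩ : ∃ t, oA p = fx :: t := by
        cases hoAeq : oA p with
        | nil => rw [hoAeq] at hhead; simp at hhead
        | cons h0 t => rw [hoAeq] at hhead; simp at hhead; exact ⟨t, by rw [hhead]⟩
      rw [hoA, List.tail_cons] at hxt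
      have hxA : x ∈ oA p := by rw [hoA]; exact List.mem_cons_of_mem _ hxt
      have hfxA : fx ∈ oA p := by rw [hoA]; exact List.mem_cons_self
      have hlen : 2 ≤ (oB p).length := by
        rw [← (hperm p).length_eq, hoA]
        have ht : 0 < t.length := List.length_pos_of_mem hxt
        simp; omega
      have hne : oB p ≠ [] := by
        intro h; rw [h] at hlen; simp at hlen
      obtain ⟨M, hM⟩ : ∃ M, PySem.List.max? (oB p) (fun v => v) = some M := by
        cases hMx : PySem.List.max? (oB p) (fun v => v) with
        | none => rw [PySem.List.max?_eq_none_iff] at hMx; exact absurd hMx hne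
        | some M => exact ⟨M, rfl⟩
      obtain ⟨m, hm'⟩ : ∃ m, PySem.List.min? (oB p) (fun v => v) = some m := by
        cases hmx : PySem.List.min? (oB p) (fun v => v) with
        | none => rw [PySem.List.min?_eq_none_iff] at hmx; exact absurd hmx hne
        | some m => exact ⟨m, rfl⟩
      have hfx_min : ∀ y ∈ oA p, fx ≤ y := by
        intro y hy
        rw [hoA] at hy
        rcases List.mem_cons.mp hy with rfl | hy
        · exact le_refl _
        · have hpw : (oA p).Pairwise (· < ·) := pv_occA_pairwise a hPre p
          rw [hoA, List.pairwise_cons] at hpw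
          exact le_of_lt (hpw.1 y hy)
      have hmfx : m = fx := by
        have h1 : fx ≤ m := hfx_min m ((hperm p).mem_iff.mpr (PySem.List.min?_mem hm'))
        have h2 : m ≤ fx := PySem.List.min?_isMin hm' fx ((hperm p).mem_iff.mp hfxA)
        exact le_antisymm h2 h1
      have hxM : x ≤ M := PySem.List.max?_isMax hM x ((hperm p).mem_iff.mp hxA)
      have hpos : 0 < p.2 - p.1 := by
        have := ((pv_mem_occA a hPre p x).mp hxA).2.2
        omega
      have hpk : p ∈ (pvIndexB a).keys :=
        (hkeys p).mpr ⟨x, (hperm p).mem_iff.mp hxA⟩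
      have hwVB : ((p.2 - p.1) * (M - m)) ∈ VB := by
        rw [hVBdef]
        refine List.mem_filterMap.mpr ⟨p, hpk, ?_⟩
        rw [if_pos hlen, hM, hm']
        rfl
      have hvw : CA.foldl max 0 ≤ (p.2 - p.1) * (M - m) := by
        rw [hv, hmfx]
        have h1 : x - fx ≤ M - fx := by omega
        calc (x - fx) * (p.2 - p.1) ≤ (M - fx) * (p.2 - p.1) :=
              mul_le_mul_of_nonneg_right h1 (le_of_lt hpos)
          _ = (p.2 - p.1) * (M - fx) := mul_comm _ _
      exact le_trans hvw ((PySem.List.le_foldl_max VB 0).2 _ hwVB)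
  · rcases PySem.List.foldl_max_mem VB 0 with h0 | hm
    · rw [h0]; exact (PySem.List.le_foldl_max CA 0).1
    · obtain ⟨p, hpk, hΦ⟩ := List.mem_filterMap.mp hm
      by_cases hlen : 2 ≤ (oB p).length
      swap
      · rw [if_neg (by simpa using hlen)] at hΦ; exact absurd hΦ (by simp)
      rw [if_pos (by simpa using hlen)] at hΦ
      have hne : oB p ≠ [] := by
        intro h; rw [h] at hlen; simp at hlen
      obtain ⟨M, hM⟩ : ∃ M, PySem.List.max? (oB p) (fun v => v) = some M := by
        cases hMx : PySem.List.max? (oB p) (fun v => v) with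
        | none => rw [PySem.List.max?_eq_none_iff] at hMx; exact absurd hMx hne
        | some M => exact ⟨M, rfl⟩
      obtain ⟨m, hm'⟩ : ∃ m, PySem.List.min? (oB p) (fun v => v) = some m := by
        cases hmx : PySem.List.min? (oB p) (fun v => v) with
        | none => rw [PySem.List.min?_eq_none_iff] at hmx; exact absurd hmx hne
        | some m => exact ⟨m, rfl⟩
      rw [hM, hm'] at hΦ
      have hΦ' : VB.foldl max 0 = (p.2 - p.1) * (M - m) := by
        injection hΦ with h
        exact h.symm
      -- decompose oA p
      have hlenA : 2 ≤ (oA p).length := by rw [(hperm p).length_eq]; exact hlen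
      obtain ⟨fx, t, hoA⟩ : ∃ fx t, oA p = fx :: t := by
        cases hoAeq : oA p with
        | nil => rw [hoAeq] at hlenA; simp at hlenA
        | cons h0 t => exact ⟨h0, t, rfl⟩
      have htne : t ≠ [] := by
        intro h; rw [hoA, h] at hlenA; simp at hlenA
      have hfxA : fx ∈ oA p := by rw [hoA]; exact List.mem_cons_self
      have hfx_min : ∀ y ∈ oA p, fx ≤ y := by
        intro y hy
        rw [hoA] at hy
        rcases List.mem_cons.mp hy with rfl | hy
        · exact le_refl _
        · have hpw : (oA p).Pairwise (· < ·) := pv_occA_pairwise a hPre p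
          rw [hoA, List.pairwise_cons] at hpw
          exact le_of_lt (hpw.1 y hy)
      have hmfx : m = fx := by
        have h1 : fx ≤ m := hfx_min m ((hperm p).mem_iff.mpr (PySem.List.min?_mem hm'))
        have h2 : m ≤ fx := PySem.List.min?_isMin hm' fx ((hperm p).mem_iff.mp hfxA)
        exact le_antisymm h2 h1
      have hMA : M ∈ oA p := (hperm p).mem_iff.mpr (PySem.List.max?_mem hM)
      have hMt : M ∈ t := by
        rw [hoA, List.mem_cons] at hMA
        rcases hMA with rfl | hMA
        · exfalso
          obtain ⟨y, hy⟩ := List.exists_mem_of_ne_nil t htne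
          have hpw : (oA p).Pairwise (· < ·) := pv_occA_pairwise a hPre p
          rw [hoA, List.pairwise_cons] at hpw
          have h1 : M < y := hpw.1 y hy
          have h2 : y ≤ M := PySem.List.max?_isMax hM y
            ((hperm p).mem_iff.mp (by rw [hoA]; exact List.mem_cons_of_mem _ hy))
          omega
        · exact hMA
      have hvCA : ((M - fx) * (p.2 - p.1)) ∈ CA := by
        rw [hmemCA]
        exact ⟨p, fx, by rw [hoA]; rfl, M, by rw [hoA, List.tail_cons]; exact hMt, rfl⟩
      have hval : (p.2 - p.1) * (M - m) = (M - fx) * (p.2 - p.1) := by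
        rw [hmfx]; ring
      rw [hΦ', hval]
      exact (PySem.List.le_foldl_max CA 0).2 _ hvCA
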